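-- pv_equiv track=rewrite | github.com/12010486/vllm-gaudi | tests/full_tests/online_model_swap_test.py | generate_prompts
-- ===== SOURCE A (Python) =====
-- SEED_PROMPTS = [
--     "Hello, my name is",
--     "The president of the United States is",
--     "The capital of France is",
--     "The future of AI is",
--     "Explain quantum computing",
--     "The tallest mountain is",
--     "Write a short poem about",
--     "The speed of light is",
--     "Technology in 2050 will be",
--     "The most important invention",
-- ]
--
-- def generate_prompts(n=20):
--     """Generate n prompts by cycling through seed prompts."""
--     prompts = []
--     for i in range(n):
--         base = SEED_PROMPTS[i % len(SEED_PROMPTS)]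
--         if i < len(SEED_PROMPTS):
--             prompts.append(base)
--         else:
--             prompts.append(f"{base} (iteration {i // len(SEED_PROMPTS)})")
--     return prompts
-- ===== SOURCE B (Python) =====
-- SEED_PROMPTS = [
--     "Hello, my name is",
--     "The president of the United States is",
--     "The capital of France is",
--     "The future of AI is",
--     "Explain quantum computing",
--     "The tallest mountain is",
--     "Write a short poem about",
--     "The speed of light is",
--     "Technology in 2050 will be",
--     "The most important invention",
-- ]
--
-- def _chunk(cycle):
--     """The prompts of one full pass over the seeds: bare on cycle 0, suffixed later."""
--     if cycle == 0:
--         return list(SEED_PROMPTS)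
--     return [f"{p} (iteration {cycle})" for p in SEED_PROMPTS]
--
-- def generate_prompts(n=20):
--     """Generate n prompts by cycling through seed prompts (whole chunks per cycle)."""
--     out = []
--     cycle = 0
--     remaining = n
--     while remaining > 0:
--         out += _chunk(cycle)[:remaining]
--         remaining -= len(SEED_PROMPTS)
--         cycle += 1
--     return out
-- ===== Notes on version B (the rewrite author's own statement) =====
-- stated objective: alternative
-- what changed: Replaced the flat indexed loop with per-index i%len/i//len modular arithmetic by a recursion over whole cycles: each recursive step emits one chunk (bare seeds for cycle 0, suffixed copies for later cycles) truncated to the remaining count, so no index arithmetic is ever done.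
import Mathlib
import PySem

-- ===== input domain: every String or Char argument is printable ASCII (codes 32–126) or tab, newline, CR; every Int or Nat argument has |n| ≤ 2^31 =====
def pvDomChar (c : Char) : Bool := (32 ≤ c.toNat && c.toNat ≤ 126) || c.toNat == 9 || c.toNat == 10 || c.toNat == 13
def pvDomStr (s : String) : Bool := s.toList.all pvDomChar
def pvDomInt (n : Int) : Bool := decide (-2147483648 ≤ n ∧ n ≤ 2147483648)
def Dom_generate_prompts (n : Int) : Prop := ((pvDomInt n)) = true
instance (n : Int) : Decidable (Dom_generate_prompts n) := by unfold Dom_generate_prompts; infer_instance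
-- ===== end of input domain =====

-- B replaces the flat indexed loop (i % len, i // len per element) by a recursion over whole
-- cycles, each step emitting one (possibly truncated) chunk of the seed list; objective: alternative.

def SEED_PROMPTS : List String :=
  [ "Hello, my name is",
    "The president of the United States is",
    "The capital of France is",
    "The future of AI is",
    "Explain quantum computing",
    "The tallest mountain is",
    "Write a short poem about",
    "The speed of light is",
    "Technology in 2050 will be",
    "The most important invention" ]

-- ===== PORT A =====
-- the index i % len(SEED_PROMPTS) is always in range (len = 10 > 0), so the default of
-- pyGetD is never used and the port is exact
def generate_prompts (n : Int) : List String :=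
  (PySem.List.pyRange 0 n 1).foldl
    (fun prompts i =>
      let base := PySem.List.pyGetD SEED_PROMPTS (PySem.Int.mod i (SEED_PROMPTS.length : Int)) ""
      if i < (SEED_PROMPTS.length : Int) then
        prompts ++ [base]
      else
        prompts ++ [base ++ " (iteration " ++ PySem.Int.toStr (PySem.Int.floordiv i (SEED_PROMPTS.length : Int)) ++ ")"])
    []

-- ===== PORT B =====
def pvChunk (cycle : Int) : List String :=
  if cycle = 0 then SEED_PROMPTS
  else SEED_PROMPTS.map (fun p => p ++ " (iteration " ++ PySem.Int.toStr cycle ++ ")")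

-- the while loop over (out, cycle, remaining); chunk[:remaining] with remaining > 0 is
-- List.take remaining.toNat (exact there; the loop guard guarantees 0 < remaining)
def pvGo (out : List String) (cycle : Int) (remaining : Int) : List String :=
  if remaining ≤ 0 then out
  else pvGo (out ++ (pvChunk cycle).take remaining.toNat) (cycle + 1)
            (remaining - (SEED_PROMPTS.length : Int))
termination_by remaining.toNat
decreasing_by
  simp only [SEED_PROMPTS, List.length]
  omega

def generate_prompts_alt (n : Int) : List String := pvGo [] 0 n

-- ===== PRECONDITION & SPEC =====
def Spec_generate_prompts (n : Int) (out : List String) : Prop := out = generate_prompts_alt n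
instance (n : Int) (out : List String) : Decidable (Spec_generate_prompts n out) := by unfold Spec_generate_prompts; infer_instance

-- ===== CLAIM (what is proved, stated in full; the proofs are below) =====
def Claim_equal_generate_prompts : Prop := ∀ (n : Int), Dom_generate_prompts n → Spec_generate_prompts n (generate_prompts n)

-- ===== LEMMAS AND PROOFS =====

-- the common element-wise characterisation: prompt number i (0-based)
def pvElem (i : Nat) : String :=
  let base := SEED_PROMPTS.getD (i % 10) ""
  if i / 10 = 0 then base
  else base ++ " (iteration " ++ PySem.Int.toStr ((i / 10 : Nat) : Int) ++ ")"

lemma pvElem_split (c j : Nat) (hj : j < 10) :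
    pvElem (10 * c + j) =
      if c = 0 then SEED_PROMPTS.getD j ""
      else SEED_PROMPTS.getD j "" ++ " (iteration " ++ PySem.Int.toStr (c : Int) ++ ")" := by
  have hm : (10 * c + j) % 10 = j := by omega
  have hd : (10 * c + j) / 10 = c := by omega
  simp [pvElem, hm, hd]

lemma pvA_char (n : Int) : generate_prompts n = (List.range n.toNat).map pvElem := by
  unfold generate_prompts
  rw [PySem.List.pyRange_one]
  simp only [sub_zero, zero_add]
  rw [List.foldl_map]
  have hbody : (fun (prompts : List String) (k : Nat) =>
      let base := PySem.List.pyGetD SEED_PROMPTS (PySem.Int.mod (k : Int) (SEED_PROMPTS.length : Int)) ""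
      if (k : Int) < (SEED_PROMPTS.length : Int) then
        prompts ++ [base]
      else
        prompts ++ [base ++ " (iteration " ++ PySem.Int.toStr (PySem.Int.floordiv (k : Int) (SEED_PROMPTS.length : Int)) ++ ")"]) =
      (fun prompts k => prompts ++ [pvElem k]) := by
    funext prompts k
    have hlen : SEED_PROMPTS.length = 10 := by rfl
    simp only [pvElem, hlen, PySem.Int.mod_natCast, PySem.Int.floordiv_natCast,
      PySem.List.pyGetD_natCast, Nat.cast_lt]
    by_cases hk : k < 10
    · have : k / 10 = 0 := by omega
      simp [hk, this]
    · have : ¬ k / 10 = 0 := by omega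
      simp [hk, this]
  rw [hbody, PySem.List.foldl_append_singleton_eq_map, List.nil_append]

lemma pvChunk_eq (c : Nat) :
    pvChunk (c : Int) = (List.range 10).map (fun j => pvElem (10 * c + j)) := by
  have h : ∀ j ∈ List.range 10, pvElem (10 * c + j) =
      (if c = 0 then SEED_PROMPTS.getD j ""
       else SEED_PROMPTS.getD j "" ++ " (iteration " ++ PySem.Int.toStr (c : Int) ++ ")") := by
    intro j hj
    exact pvElem_split c j (List.mem_range.mp hj)
  rw [List.map_congr_left h]
  by_cases hc : c = 0
  · subst hc
    simp [pvChunk]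
    rfl
  · have : (c : Int) ≠ 0 := by exact_mod_cast hc
    simp only [pvChunk, this, hc]
    rfl

lemma pvGo_aux : ∀ (k c : Nat) (r : Int) (out : List String), r.toNat ≤ k →
    pvGo out (c : Int) r = out ++ (List.range r.toNat).map (fun j => pvElem (10 * c + j)) := by
  intro k
  induction k with
  | zero =>
    intro c r out hr
    rw [pvGo]
    have h0 : r ≤ 0 := by omega
    have h1 : r.toNat = 0 := by omega
    simp [h0, h1]
  | succ k ih =>
    intro c r out hr
    rw [pvGo]
    by_cases h0 : r ≤ 0
    · have h1 : r.toNat = 0 := by omega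
      simp [h0, h1]
    · have hlen : (SEED_PROMPTS.length : Int) = 10 := by rfl
      have hcast : (c : Int) + 1 = ((c + 1 : Nat) : Int) := by push_cast; ring
      have hih : (r - 10).toNat ≤ k := by omega
      rw [if_neg h0, hlen, hcast, ih (c + 1) (r - 10) _ hih, pvChunk_eq, ← List.map_take,
        List.append_assoc]
      congr 1
      by_cases ht : r.toNat ≤ 10
      · have h2 : (r - 10).toNat = 0 := by omega
        rw [h2, List.take_range]
        have : min r.toNat 10 = r.toNat := by omega
        simp [this]
      · have h2 : (r - 10).toNat = r.toNat - 10 := by omega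
        have h3 : r.toNat = 10 + (r.toNat - 10) := by omega
        rw [List.take_range]
        have hmin : min r.toNat 10 = 10 := by omega
        rw [hmin, h2]
        conv_rhs => rw [h3, List.range_add, List.map_append, List.map_map]
        congr 1
        apply List.map_congr_left
        intro j _
        have : 10 * c + (10 + j) = 10 * (c + 1) + j := by ring
        simp [Function.comp, this]

lemma pvGo_char (c : Nat) (r : Int) :
    pvGo [] (c : Int) r = (List.range r.toNat).map (fun j => pvElem (10 * c + j)) := by
  rw [pvGo_aux r.toNat c r [] le_rfl, List.nil_append]

-- ===== VERDICT (by name: the statement is the Claim_ definition above) =====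
theorem generate_prompts_spec : Claim_equal_generate_prompts := by
  intro n _
  unfold Spec_generate_prompts generate_prompts_alt
  rw [pvA_char, (by norm_num : (0 : Int) = ((0 : Nat) : Int)), pvGo_char]
  simp
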